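-- pv_equiv track=rewrite | github.com/phantomlution/stockBackEnd | src/script/job/StockTradeDataJob.py | check_time_sequence
-- ===== SOURCE A (Python) =====
-- def check_time_sequence(item_list, timestamp_position):
--     for index, item in enumerate(item_list):
--         if index > 0 and index < len(item_list):
--             current = item_list[index]
--             former = item_list[index - 1]
--             if current[timestamp_position] < former[timestamp_position]:
--                 return False
--     return True
-- ===== SOURCE B (Python) =====
-- def check_time_sequence(item_list, timestamp_position):
--     keys = [item[timestamp_position] for item in item_list]
--     return keys == sorted(keys)
-- ===== Notes on version B (the rewrite author's own statement) =====
-- stated objective: simpler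
-- what changed: Replaces the explicit indexed pairwise scan with extracting the timestamp keys once and comparing the key list with its sorted copy (a list equals its sorted copy exactly when it is non-decreasing).
-- outside the precondition, e.g. on check_time_sequence([[5], [3], []], 0): A returns False, B raises IndexError
import Mathlib
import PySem

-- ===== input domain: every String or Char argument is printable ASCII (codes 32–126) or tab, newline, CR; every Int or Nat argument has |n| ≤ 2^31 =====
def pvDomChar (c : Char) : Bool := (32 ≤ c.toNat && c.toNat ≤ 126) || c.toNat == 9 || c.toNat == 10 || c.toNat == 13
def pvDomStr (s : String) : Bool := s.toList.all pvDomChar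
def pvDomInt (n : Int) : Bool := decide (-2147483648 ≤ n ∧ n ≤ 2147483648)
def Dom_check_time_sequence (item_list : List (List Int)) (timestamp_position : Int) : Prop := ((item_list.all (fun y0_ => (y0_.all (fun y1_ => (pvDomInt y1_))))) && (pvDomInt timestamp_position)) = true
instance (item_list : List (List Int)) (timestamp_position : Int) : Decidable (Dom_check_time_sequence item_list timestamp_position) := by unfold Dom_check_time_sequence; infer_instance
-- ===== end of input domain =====

-- B extracts the timestamp keys once and compares with their sorted copy instead of A's indexed pairwise scan (simpler).


-- ===== PORT A =====
-- the for-loop with early `return False`; item_list[index][timestamp_position] is pyGetD, exact under Pre_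
def ctsGo (full : List (List Int)) (ts : Int) : List (Int × List Int) → Bool
  | [] => true
  | (index, _item) :: rest =>
    if 0 < index ∧ index < (full.length : Int) then
      let current := PySem.List.pyGetD full index []
      let former := PySem.List.pyGetD full (index - 1) []
      if PySem.List.pyGetD current ts 0 < PySem.List.pyGetD former ts 0 then false
      else ctsGo full ts rest
    else ctsGo full ts rest

def check_time_sequence (item_list : List (List Int)) (timestamp_position : Int) : Bool :=
  ctsGo item_list timestamp_position (PySem.List.enumerate item_list 0)

-- ===== PORT B =====
def check_time_sequence_alt (item_list : List (List Int)) (timestamp_position : Int) : Bool :=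
  let keys := item_list.map (fun item => PySem.List.pyGetD item timestamp_position 0)
  decide (keys = PySem.List.sorted keys (fun x => x) false)

-- ===== PRECONDITION & SPEC =====
-- Pre_ excludes lists in which some item is not indexable at timestamp_position: there A may still
-- return False early (before reaching the bad item) while B, which inspects every item, raises IndexError.
def Pre_check_time_sequence (item_list : List (List Int)) (timestamp_position : Int) : Prop :=
  ∀ item ∈ item_list, PySem.Raise.InRange item.length timestamp_position
instance (item_list : List (List Int)) (timestamp_position : Int) : Decidable (Pre_check_time_sequence item_list timestamp_position) := by unfold Pre_check_time_sequence; infer_instance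
def pvWitness_check_time_sequence : List (List Int) × Int := ([[1, 3], [2, 2], [5, 9]], 1)

def Spec_check_time_sequence (item_list : List (List Int)) (timestamp_position : Int) (out : Bool) : Prop := out = check_time_sequence_alt item_list timestamp_position
instance (item_list : List (List Int)) (timestamp_position : Int) (out : Bool) : Decidable (Spec_check_time_sequence item_list timestamp_position out) := by unfold Spec_check_time_sequence; infer_instance

-- ===== CLAIM (what is proved, stated in full; the proofs are below) =====
def Claim_equal_check_time_sequence : Prop := ∀ (item_list : List (List Int)) (timestamp_position : Int), Dom_check_time_sequence item_list timestamp_position → Pre_check_time_sequence item_list timestamp_position → Spec_check_time_sequence item_list timestamp_position (check_time_sequence item_list timestamp_position)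

-- ===== LEMMAS AND PROOFS =====

-- A's scan over enumerate xs s, for 1 ≤ s and s + |xs| = |full|, decides the chain condition on the
-- keys of the suffix of full starting at s-1.
theorem ctsGo_enum (full : List (List Int)) (ts : Int) :
    ∀ (xs : List (List Int)) (s : Nat), 1 ≤ s → s + xs.length = full.length →
    (ctsGo full ts (PySem.List.enumerate xs (s : Int)) = true
      ↔ List.IsChain (· ≤ ·) ((full.drop (s - 1)).map (fun item => PySem.List.pyGetD item ts 0))) := by
  intro xs
  induction xs with
  | nil =>
    intro s hs hlen
    simp only [List.length_nil, Nat.add_zero] at hlen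
    have hdrop : (full.drop (s - 1)).length = 1 := by
      rw [List.length_drop]; omega
    rcases h : full.drop (s - 1) with _ | ⟨a, _ | ⟨b, t⟩⟩ <;>
      simp [h, PySem.List.enumerate, ctsGo] at hdrop ⊢
  | cons x rest ih =>
    intro s hs hlen
    have hslt : s < full.length := by simp at hlen; omega
    have hs1 : s - 1 < full.length := by omega
    rw [show PySem.List.enumerate (x :: rest) (s : Int) = ((s : Int), x) :: PySem.List.enumerate rest ((s : Int) + 1) from rfl]
    simp only [ctsGo, if_pos (by constructor <;> omega : 0 < (s : Int) ∧ (s : Int) < (full.length : Int))]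
    have hcur : PySem.List.pyGetD full (s : Int) [] = full[s] := by
      have := PySem.List.pyGetD_eq_getElem (xs := full) (i := (s : Int)) (d := [])
        (by omega) (by push_cast; omega)
      simpa using this
    have hfor : PySem.List.pyGetD full ((s : Int) - 1) [] = full[s - 1] := by
      have h1 : ((s : Int) - 1) = ((s - 1 : Nat) : Int) := by omega
      rw [h1]
      have := PySem.List.pyGetD_eq_getElem (xs := full) (i := ((s - 1 : Nat) : Int)) (d := [])
        (by omega) (by push_cast; omega)
      simpa using this
    have hdrop1 : full.drop (s - 1) = full[s - 1] :: full.drop s := by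
      have := List.drop_eq_getElem_cons hs1
      simpa [show s - 1 + 1 = s by omega] using this
    have hdrop2 : full.drop s = full[s] :: full.drop (s + 1) := by
      simpa using List.drop_eq_getElem_cons hslt
    have ihr := ih (s + 1) (by omega) (by simp at hlen ⊢; omega)
    rw [show ((s : Int) + 1) = ((s + 1 : Nat) : Int) by push_cast; ring] at *
    rw [show s + 1 - 1 = s from rfl, hdrop2] at ihr
    rw [hcur, hfor, hdrop1, hdrop2]
    simp only [List.map_cons, List.isChain_cons_cons]
    by_cases hlt : PySem.List.pyGetD full[s] ts 0 < PySem.List.pyGetD full[s - 1] ts 0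
    · simp [hlt, not_le.mpr hlt]
    · simp only [if_neg hlt, List.map_cons] at ihr ⊢
      rw [ihr]
      simp [not_lt.mp hlt]

-- keys = sorted(keys) ↔ keys is a ≤-chain
theorem keys_sorted_iff (keys : List Int) :
    (keys = PySem.List.sorted keys (fun x => x) false) ↔ List.IsChain (· ≤ ·) keys := by
  rw [List.isChain_iff_pairwise]
  constructor
  · intro h
    have := PySem.List.sorted_pairwise (xs := keys) (key := fun x => x)
    rw [← h] at this
    exact this
  · intro h
    exact (PySem.List.sorted_eq_self_of_pairwise keys (fun x => x) h).symm

-- ===== VERDICT (by name: the statement is the Claim_ definition above) =====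
theorem check_time_sequence_spec : Claim_equal_check_time_sequence := by
  intro item_list ts _ _
  unfold Spec_check_time_sequence check_time_sequence check_time_sequence_alt
  rw [Bool.eq_iff_iff, decide_eq_true_iff, keys_sorted_iff]
  cases item_list with
  | nil => simp [PySem.List.enumerate, ctsGo]
  | cons h t =>
    rw [show PySem.List.enumerate (h :: t) (0 : Int) = ((0 : Int), h) :: PySem.List.enumerate t 1 from rfl]
    simp only [ctsGo, if_neg (by omega : ¬ ((0 : Int) < 0 ∧ (0 : Int) < ((h :: t).length : Int)))]
    have := ctsGo_enum (h :: t) ts t 1 le_rfl (by simp; omega)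
    simpa using this
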